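-- pv_equiv track=rewrite | github.com/ESCristiano/mstp-artifacts-usenix | m-step/mstp-visualizer/scripts/find-patterns.py | find_pattern_matches
-- ===== SOURCE A (Python) =====
-- def find_pattern_matches(trace_data, pattern_timings):
--     """Find all matches of a timing pattern in trace data"""
--     matches = []
--     trace_timings = [time for prefix, time, line_id in trace_data]
--     pattern_length = len(pattern_timings)
--
--     # Search for pattern in trace
--     for i in range(len(trace_timings) - pattern_length + 1):
--         # Check if pattern matches at this position
--         if trace_timings[i:i + pattern_length] == pattern_timings:
--             # Store the start index and length for later context extraction
--             matches.append((i, pattern_length))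
--
--     return matches
-- ===== SOURCE B (Python) =====
-- def find_pattern_matches(trace_data, pattern_timings):
--     """Candidate-refinement matcher: start from every possible start position
--     and filter the candidate set once per pattern element (early exit when no
--     candidate survives), instead of slicing the trace at every position."""
--     timings = [time for _, time, _ in trace_data]
--     m = len(pattern_timings)
--     candidates = list(range(len(timings) - m + 1))
--     j = 0
--     for p in pattern_timings:
--         candidates = [i for i in candidates if timings[i + j] == p]
--         if not candidates:
--             break
--         j += 1
--     return [(i, m) for i in candidates]
-- ===== Notes on version B (the rewrite author's own statement) =====
-- stated objective: alternative
-- what changed: Replaces the position-by-position slice comparison with candidate-set refinement: start from all start positions and filter the surviving candidates once per pattern element, exiting early when none survive.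
import Mathlib
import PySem

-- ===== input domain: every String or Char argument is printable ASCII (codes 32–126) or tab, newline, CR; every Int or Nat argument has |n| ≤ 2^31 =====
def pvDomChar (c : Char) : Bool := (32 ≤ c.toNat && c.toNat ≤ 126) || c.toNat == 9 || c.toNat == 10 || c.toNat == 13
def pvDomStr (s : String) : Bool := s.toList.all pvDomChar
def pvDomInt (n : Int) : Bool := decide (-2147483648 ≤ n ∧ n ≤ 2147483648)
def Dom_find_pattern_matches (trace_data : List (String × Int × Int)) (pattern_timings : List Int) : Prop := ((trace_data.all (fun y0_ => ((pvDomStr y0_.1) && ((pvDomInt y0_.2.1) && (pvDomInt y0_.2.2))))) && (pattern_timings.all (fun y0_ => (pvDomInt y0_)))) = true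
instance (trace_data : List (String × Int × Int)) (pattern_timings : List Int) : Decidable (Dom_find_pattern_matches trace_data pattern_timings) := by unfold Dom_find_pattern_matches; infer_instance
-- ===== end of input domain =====

-- ===== PORT A =====
-- B replaces the per-position slice comparison by candidate-set refinement, one filter pass per pattern element (alternative decomposition).
def find_pattern_matches (trace_data : List (String × Int × Int)) (pattern_timings : List Int) : List (Int × Int) :=
  let trace_timings := trace_data.map (fun x => x.2.1)
  let pattern_length : Int := pattern_timings.length
  (PySem.List.pyRange 0 ((trace_timings.length : Int) - pattern_length + 1) 1).foldl
    (fun acc i =>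
      if PySem.List.slice trace_timings (some i) (some (i + pattern_length)) = pattern_timings
      then acc ++ [(i, pattern_length)] else acc) []

-- ===== PORT B =====
-- the 'for p in pattern_timings' refinement loop of Source B, with its early 'break' when no candidate survives
-- indexing: 'timings[i + j]' is in range for every surviving candidate, so 'pyGet? = some p' is exact
def pvRefineLoop (timings : List Int) (pat : List Int) (j : Int) (candidates : List Int) : List Int :=
  match pat with
  | [] => candidates
  | p :: ps =>
      let c := candidates.filter (fun i => PySem.List.pyGet? timings (i + j) == some p)
      if c = [] then c else pvRefineLoop timings ps (j + 1) c

def find_pattern_matches_alt (trace_data : List (String × Int × Int)) (pattern_timings : List Int) : List (Int × Int) :=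
  let timings := trace_data.map (fun x => x.2.1)
  let m : Int := pattern_timings.length
  let candidates := PySem.List.pyRange 0 ((timings.length : Int) - m + 1) 1
  (pvRefineLoop timings pattern_timings 0 candidates).map (fun i => (i, m))

-- ===== PRECONDITION & SPEC =====
def Spec_find_pattern_matches (trace_data : List (String × Int × Int)) (pattern_timings : List Int) (out : List (Int × Int)) : Prop := out = find_pattern_matches_alt trace_data pattern_timings
instance (trace_data : List (String × Int × Int)) (pattern_timings : List Int) (out : List (Int × Int)) : Decidable (Spec_find_pattern_matches trace_data pattern_timings out) := by unfold Spec_find_pattern_matches; infer_instance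

-- ===== CLAIM (what is proved, stated in full; the proofs are below) =====
def Claim_equal_find_pattern_matches : Prop := ∀ (trace_data : List (String × Int × Int)) (pattern_timings : List Int), Dom_find_pattern_matches trace_data pattern_timings → Spec_find_pattern_matches trace_data pattern_timings (find_pattern_matches trace_data pattern_timings)

-- ===== LEMMAS AND PROOFS =====

-- ===== VERDICT (by name: the statement is the Claim_ definition above) =====
-- matched at offsets j, j+1, … : the condition the refinement loop accumulates
def pvMatchAll (timings pat : List Int) (j i : Int) : Bool :=
  match pat with
  | [] => true
  | p :: ps => (PySem.List.pyGet? timings (i + j) == some p) && pvMatchAll timings ps (j + 1) i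

theorem pvRefineLoop_eq_filter (timings : List Int) :
    ∀ (pat : List Int) (j : Int) (cands : List Int),
    pvRefineLoop timings pat j cands = cands.filter (fun i => pvMatchAll timings pat j i) := by
  intro pat
  induction pat with
  | nil => intro j cands; simp [pvRefineLoop, pvMatchAll]
  | cons p ps ih =>
    intro j cands
    simp only [pvRefineLoop, pvMatchAll]
    by_cases h : cands.filter (fun i => PySem.List.pyGet? timings (i + j) == some p) = []
    · simp only [h, if_true]
      have : cands.filter (fun i =>
          (PySem.List.pyGet? timings (i + j) == some p) && pvMatchAll timings ps (j + 1) i)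
          = (cands.filter (fun i => PySem.List.pyGet? timings (i + j) == some p)).filter
              (fun i => pvMatchAll timings ps (j + 1) i) := by
        rw [List.filter_filter]
        exact List.filter_congr (fun x _ => by rw [Bool.and_comm])
      rw [this, h]
      rfl
    · rw [if_neg h, ih, List.filter_filter]
      exact List.filter_congr (fun x _ => by rw [Bool.and_comm])

theorem pvMatchAll_eq_take (timings : List Int) :
    ∀ (pat : List Int) (j i : Int), 0 ≤ i + j →
    (i + j).toNat + pat.length ≤ timings.length →
    pvMatchAll timings pat j i
      = decide ((timings.drop (i + j).toNat).take pat.length = pat) := by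
  intro pat
  induction pat with
  | nil => intro j i _ _; simp [pvMatchAll]
  | cons p ps ih =>
    intro j i hij hlen
    have hk : (i + j).toNat < timings.length := by simp [List.length_cons] at hlen; omega
    have hget : PySem.List.pyGet? timings (i + j) = some timings[(i + j).toNat] :=
      PySem.List.pyGet?_eq_some_getElem timings hij (by exact_mod_cast Int.lt_of_toNat_lt hk)
    have hdrop : timings.drop (i + j).toNat
        = timings[(i + j).toNat] :: timings.drop ((i + j).toNat + 1) :=
      List.drop_eq_getElem_cons hk
    have hsucc : (i + (j + 1)).toNat = (i + j).toNat + 1 := by omega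
    have hih := ih (j + 1) i (by omega) (by simp [List.length_cons] at hlen; rw [hsucc]; omega)
    rw [hsucc] at hih
    simp only [pvMatchAll, hget, hdrop, List.take_succ_cons, List.length_cons, hih]
    by_cases h1 : timings[(i + j).toNat] = p
    · by_cases h2 : (timings.drop ((i + j).toNat + 1)).take ps.length = ps
      · simp [h1, h2]
      · simp [h1, h2]
    · simp [h1]

theorem find_pattern_matches_spec : Claim_equal_find_pattern_matches := by
  intro trace_data pattern_timings _
  unfold Spec_find_pattern_matches find_pattern_matches find_pattern_matches_alt
  simp only [PySem.List.foldl_append_ite, List.nil_append, pvRefineLoop_eq_filter]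
  congr 1
  apply List.filter_congr
  intro i hi
  set timings := trace_data.map (fun x => x.2.1) with htim
  rw [PySem.List.mem_pyRange_one] at hi
  obtain ⟨hi0, hilt⟩ := hi
  have hlen : i.toNat + pattern_timings.length ≤ timings.length := by omega
  have hm0 : (0:Int) ≤ pattern_timings.length := by positivity
  have hslice : PySem.List.slice timings (some i) (some (i + pattern_timings.length))
      = (timings.drop i.toNat).take pattern_timings.length := by
    rw [PySem.List.slice_toNat timings hi0 (by omega)]
    congr 1
    omega
  have h0 : (i + (0:Int)).toNat = i.toNat := by omega
  rw [pvMatchAll_eq_take timings pattern_timings 0 i (by omega) (by rw [h0]; exact hlen),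
    hslice, h0]
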